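-- pv_equiv track=rewrite | github.com/bmvdgeijn/WASP | mapping/NEW/find_intersecting_snps.py | generate_reads
-- ===== SOURCE A (Python) =====
-- def generate_reads(read_seq, ref_alleles, alt_alleles, read_pos, i):
--     """Recursively generate set of reads with all possible combinations
--     of alleles (i.e. 2^n combinations where n is the number of snps overlapping
--     the reads)
--     """
--     # TODO: this would use a lot less memory if re-implemented
--     # to not use recursion
--
--     # create new version of this read with both reference and
--     # alternative versions of allele at this index
--     idx = read_pos[i]-1
--     ref_read = read_seq[:idx] + ref_alleles[i] + read_seq[idx+1:]
--     alt_read = read_seq[:idx] + alt_alleles[i] + read_seq[idx+1:]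
--
--     if i == len(read_pos)-1:
--         # this was the last SNP
--         return [ref_read, alt_read]
--
--     # continue recursively with other SNPs overlapping this read
--     reads1 = generate_reads(ref_read, ref_alleles, alt_alleles, read_pos, i+1)
--     reads2 = generate_reads(alt_read, ref_alleles, alt_alleles, read_pos, i+1)
--
--     return reads1 + reads2
-- ===== SOURCE B (Python) =====
-- def generate_reads(read_seq, ref_alleles, alt_alleles, read_pos, i):
--     """Iteratively enumerate the 2^k allele combinations with a bitmask
--     (SNP at index i is the most significant bit; 0-bit = reference allele),
--     applying the substitutions left-to-right to the read."""
--     k = len(read_pos) - i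
--     reads = []
--     for mask in range(2 ** k):
--         r = read_seq
--         for o in range(k):
--             j = i + o
--             if (mask >> (k - 1 - o)) & 1:
--                 allele = alt_alleles[j]
--             else:
--                 allele = ref_alleles[j]
--             idx = read_pos[j] - 1
--             r = r[:idx] + allele + r[idx + 1:]
--         reads.append(r)
--     return reads
-- ===== Notes on version B (the rewrite author's own statement) =====
-- stated objective: alternative
-- what changed: Replaces the binary recursion over SNP indices by a flat iterative loop that enumerates the 2^k allele combinations as bitmasks (SNP i = most significant bit, 0 = reference allele) and applies the substitutions left-to-right; same output in the same order, no recursion.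
import Mathlib
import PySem

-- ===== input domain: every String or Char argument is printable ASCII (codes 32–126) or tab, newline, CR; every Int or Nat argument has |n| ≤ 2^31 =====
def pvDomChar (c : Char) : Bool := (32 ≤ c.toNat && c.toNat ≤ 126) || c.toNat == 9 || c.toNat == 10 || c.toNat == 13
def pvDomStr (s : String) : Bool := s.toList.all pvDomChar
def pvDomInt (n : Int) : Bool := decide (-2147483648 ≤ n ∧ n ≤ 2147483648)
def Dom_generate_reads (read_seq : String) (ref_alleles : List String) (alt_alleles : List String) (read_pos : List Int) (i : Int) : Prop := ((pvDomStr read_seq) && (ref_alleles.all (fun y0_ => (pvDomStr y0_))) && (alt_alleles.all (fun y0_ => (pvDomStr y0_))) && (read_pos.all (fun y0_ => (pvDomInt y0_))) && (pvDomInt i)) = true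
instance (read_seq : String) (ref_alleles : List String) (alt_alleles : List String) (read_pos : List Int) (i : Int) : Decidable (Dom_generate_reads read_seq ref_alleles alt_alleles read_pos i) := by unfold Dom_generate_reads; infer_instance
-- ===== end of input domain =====

-- B replaces A's binary recursion by a flat iterative bitmask enumeration of the 2^k
-- allele combinations (same output, same order, same cost); equal return values proved on Pre_.

-- shared helper: Python's  r[:idx] + allele + r[idx+1:]  (both sources contain this exact expression)
def pvSub (r : String) (idx : Int) (allele : String) : String :=
  String.ofList (PySem.List.slice r.toList none (some idx) ++ allele.toList ++
                 PySem.List.slice r.toList (some (idx + 1)) none)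

-- ===== PORT A =====
def generate_reads (read_seq : String) (ref_alleles : List String) (alt_alleles : List String) (read_pos : List Int) (i : Int) : List String :=
  match hp : PySem.List.pyGet? read_pos i, PySem.List.pyGet? ref_alleles i, PySem.List.pyGet? alt_alleles i with
  | some p, some ra, some aa =>
      let idx := p - 1
      let ref_read := pvSub read_seq idx ra
      let alt_read := pvSub read_seq idx aa
      if i = (read_pos.length : Int) - 1 then
        [ref_read, alt_read]
      else
        generate_reads ref_read ref_alleles alt_alleles read_pos (i + 1) ++
        generate_reads alt_read ref_alleles alt_alleles read_pos (i + 1)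
  | _, _, _ => []  -- Python raises IndexError here; excluded by Pre_
termination_by ((read_pos.length : Int) - i).toNat
decreasing_by
  all_goals
    have hin : ¬ PySem.List.pyGet? read_pos i = none := by simp [hp]
    rw [PySem.List.pyGet?_eq_none_iff] at hin
    rcases not_not.mp hin with ⟨h1, h2⟩
    omega

-- ===== PORT B =====
-- body of Source B's inner loop: one substitution, allele chosen by bit (kn-1-o) of mask
def pvStep (ref_alleles : List String) (alt_alleles : List String) (read_pos : List Int) (i : Int) (kn : Nat) (mask : Nat) (r : String) (o : Nat) : String :=
  let j : Int := i + (o : Int)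
  let allele := if ((mask >>> (kn - 1 - o) : Nat) &&& 1) == 1
                then PySem.List.pyGetD alt_alleles j ""
                else PySem.List.pyGetD ref_alleles j ""
  let idx := PySem.List.pyGetD read_pos j 0 - 1
  pvSub r idx allele

-- inner loop of Source B: apply, for o in range(kn), the allele chosen by bit (kn-1-o) of mask
def pvAltRead (read_seq : String) (ref_alleles : List String) (alt_alleles : List String) (read_pos : List Int) (i : Int) (kn : Nat) (mask : Nat) : String :=
  (List.range kn).foldl (pvStep ref_alleles alt_alleles read_pos i kn mask) read_seq

def generate_reads_alt (read_seq : String) (ref_alleles : List String) (alt_alleles : List String) (read_pos : List Int) (i : Int) : List String :=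
  let kn : Nat := ((read_pos.length : Int) - i).toNat
  (List.range (2 ^ kn)).foldl
    (fun reads mask => reads ++ [pvAltRead read_seq ref_alleles alt_alleles read_pos i kn mask])
    []

-- ===== PRECONDITION & SPEC =====
-- exactly the inputs on which the Python A returns (every index it touches is in range)
def Pre_generate_reads (read_seq : String) (ref_alleles : List String) (alt_alleles : List String) (read_pos : List Int) (i : Int) : Prop :=
  -(read_pos.length : Int) ≤ i ∧ i < (read_pos.length : Int) ∧
  read_pos.length ≤ ref_alleles.length ∧ read_pos.length ≤ alt_alleles.length
instance (read_seq : String) (ref_alleles : List String) (alt_alleles : List String) (read_pos : List Int) (i : Int) : Decidable (Pre_generate_reads read_seq ref_alleles alt_alleles read_pos i) := by unfold Pre_generate_reads; infer_instance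
def pvWitness_generate_reads : String × List String × List String × List Int × Int := ("AB", ["C"], ["G"], [1], 0)

def Spec_generate_reads (read_seq : String) (ref_alleles : List String) (alt_alleles : List String) (read_pos : List Int) (i : Int) (out : List String) : Prop := out = generate_reads_alt read_seq ref_alleles alt_alleles read_pos i
instance (read_seq : String) (ref_alleles : List String) (alt_alleles : List String) (read_pos : List Int) (i : Int) (out : List String) : Decidable (Spec_generate_reads read_seq ref_alleles alt_alleles read_pos i out) := by unfold Spec_generate_reads; infer_instance

-- ===== CLAIM (what is proved, stated in full; the proofs are below) =====
def Claim_equal_generate_reads : Prop := ∀ (read_seq : String) (ref_alleles : List String) (alt_alleles : List String) (read_pos : List Int) (i : Int), Dom_generate_reads read_seq ref_alleles alt_alleles read_pos i → Pre_generate_reads read_seq ref_alleles alt_alleles read_pos i → Spec_generate_reads read_seq ref_alleles alt_alleles read_pos i (generate_reads read_seq ref_alleles alt_alleles read_pos i)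

-- ===== LEMMAS AND PROOFS =====

-- bit (kn'-1-o) of 2^kn'+mask equals that of mask, for o < kn'
lemma pvBit_high (kn' o mask : Nat) (ho : o < kn') :
    ((2 ^ kn' + mask) >>> (kn' - 1 - o)) &&& 1 = (mask >>> (kn' - 1 - o)) &&& 1 := by
  set s := kn' - 1 - o with hs
  have hslt : s < kn' := by omega
  rw [Nat.shiftRight_eq_div_pow, Nat.shiftRight_eq_div_pow, Nat.and_one_is_mod, Nat.and_one_is_mod]
  have hpow : 2 ^ kn' = 2 ^ (kn' - s) * 2 ^ s := by rw [← pow_add]; congr 1; omega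
  rw [hpow, Nat.add_comm, Nat.add_mul_div_right mask _ (Nat.two_pow_pos s)]
  have h2 : 2 ∣ 2 ^ (kn' - s) := dvd_pow_self 2 (by omega)
  omega

-- B's inner loop, low half: top bit 0 → take the reference allele first
lemma pvAltRead_low (s : String) (ref alt : List String) (pos : List Int) (i : Int) (kn' mask : Nat)
    (hm : mask < 2 ^ kn') :
    pvAltRead s ref alt pos i (kn' + 1) mask =
      pvAltRead (pvSub s (PySem.List.pyGetD pos i 0 - 1) (PySem.List.pyGetD ref i "")) ref alt pos (i + 1) kn' mask := by
  unfold pvAltRead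
  rw [List.range_succ_eq_map, List.foldl_cons, List.foldl_map]
  have h0 : pvStep ref alt pos i (kn' + 1) mask s 0 =
      pvSub s (PySem.List.pyGetD pos i 0 - 1) (PySem.List.pyGetD ref i "") := by
    have htop : mask >>> kn' = 0 := by
      rw [Nat.shiftRight_eq_div_pow]
      exact Nat.div_eq_of_lt hm
    simp [pvStep, htop]
  rw [h0]
  apply PySem.List.foldl_congr_mem
  intro acc o _
  unfold pvStep
  have hj : i + ((Nat.succ o : Nat) : Int) = (i + 1) + (o : Int) := by push_cast; ring
  have hsh : kn' + 1 - 1 - Nat.succ o = kn' - 1 - o := by omega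
  simp only [hj, hsh]

-- B's inner loop, high half: top bit 1 → take the alternative allele first
lemma pvAltRead_high (s : String) (ref alt : List String) (pos : List Int) (i : Int) (kn' mask : Nat)
    (hm : mask < 2 ^ kn') :
    pvAltRead s ref alt pos i (kn' + 1) (2 ^ kn' + mask) =
      pvAltRead (pvSub s (PySem.List.pyGetD pos i 0 - 1) (PySem.List.pyGetD alt i "")) ref alt pos (i + 1) kn' mask := by
  unfold pvAltRead
  rw [List.range_succ_eq_map, List.foldl_cons, List.foldl_map]
  have h0 : pvStep ref alt pos i (kn' + 1) (2 ^ kn' + mask) s 0 =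
      pvSub s (PySem.List.pyGetD pos i 0 - 1) (PySem.List.pyGetD alt i "") := by
    have htop : (2 ^ kn' + mask) >>> kn' = 1 := by
      rw [Nat.shiftRight_eq_div_pow, Nat.add_comm, Nat.add_div_right _ (Nat.two_pow_pos kn'),
        Nat.div_eq_of_lt hm]
    simp [pvStep, htop]
  rw [h0]
  apply PySem.List.foldl_congr_mem
  intro acc o hmem
  have ho : o < kn' := List.mem_range.mp hmem
  unfold pvStep
  have hj : i + ((Nat.succ o : Nat) : Int) = (i + 1) + (o : Int) := by push_cast; ring
  have hsh : kn' + 1 - 1 - Nat.succ o = kn' - 1 - o := by omega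
  simp only [hj, hsh, pvBit_high kn' o mask ho]

-- B at i = len(read_pos): one empty mask, no substitutions
lemma pvAlt_base (s : String) (ref alt : List String) (pos : List Int) (i : Int)
    (h : ((pos.length : Int) - i).toNat = 0) :
    generate_reads_alt s ref alt pos i = [s] := by
  simp [generate_reads_alt, h, pvAltRead]

-- B's recurrence: splitting the mask range on the top bit gives A's two recursive halves
lemma pvAlt_rec (s : String) (ref alt : List String) (pos : List Int) (i : Int)
    (hlt : i < (pos.length : Int)) :
    generate_reads_alt s ref alt pos i =
      generate_reads_alt (pvSub s (PySem.List.pyGetD pos i 0 - 1) (PySem.List.pyGetD ref i "")) ref alt pos (i + 1) ++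
      generate_reads_alt (pvSub s (PySem.List.pyGetD pos i 0 - 1) (PySem.List.pyGetD alt i "")) ref alt pos (i + 1) := by
  have hk : ((pos.length : Int) - i).toNat = ((pos.length : Int) - (i + 1)).toNat + 1 := by omega
  unfold generate_reads_alt
  simp only [hk, PySem.List.foldl_append_singleton_eq_map, List.nil_append]
  set kn' := ((pos.length : Int) - (i + 1)).toNat with hkn'
  have h2 : 2 ^ (kn' + 1) = 2 ^ kn' + 2 ^ kn' := by ring
  rw [h2, List.range_add, List.map_append, List.map_map]
  congr 1
  · exact List.map_congr_left (fun mask hmem => pvAltRead_low s ref alt pos i kn' mask (List.mem_range.mp hmem))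
  · exact List.map_congr_left (fun mask hmem => pvAltRead_high s ref alt pos i kn' mask (List.mem_range.mp hmem))

lemma pvMain (ref alt : List String) (pos : List Int)
    (hr : pos.length ≤ ref.length) (ha : pos.length ≤ alt.length) :
    ∀ (d : Nat) (i : Int) (s : String), ((pos.length : Int) - 1 - i).toNat = d →
      -(pos.length : Int) ≤ i → i < (pos.length : Int) →
      generate_reads s ref alt pos i = generate_reads_alt s ref alt pos i := by
  intro d
  induction d with
  | zero =>
    intro i s hd hlo hhi
    obtain ⟨p, hp⟩ : ∃ p, PySem.List.pyGet? pos i = some p := by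
      cases h : PySem.List.pyGet? pos i with
      | none => exact absurd ⟨hlo, hhi⟩ ((PySem.List.pyGet?_eq_none_iff pos i).mp h)
      | some p => exact ⟨p, rfl⟩
    obtain ⟨ra, hra⟩ : ∃ ra, PySem.List.pyGet? ref i = some ra := by
      cases h : PySem.List.pyGet? ref i with
      | none => exact absurd ⟨by omega, by omega⟩ ((PySem.List.pyGet?_eq_none_iff ref i).mp h)
      | some ra => exact ⟨ra, rfl⟩
    obtain ⟨aa, haa⟩ : ∃ aa, PySem.List.pyGet? alt i = some aa := by
      cases h : PySem.List.pyGet? alt i with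
      | none => exact absurd ⟨by omega, by omega⟩ ((PySem.List.pyGet?_eq_none_iff alt i).mp h)
      | some aa => exact ⟨aa, rfl⟩
    have hgp : PySem.List.pyGetD pos i 0 = p := by simp [PySem.List.pyGetD, hp]
    have hgr : PySem.List.pyGetD ref i "" = ra := by simp [PySem.List.pyGetD, hra]
    have hga : PySem.List.pyGetD alt i "" = aa := by simp [PySem.List.pyGetD, haa]
    rw [pvAlt_rec s ref alt pos i hhi,
      pvAlt_base _ ref alt pos (i + 1) (by omega), pvAlt_base _ ref alt pos (i + 1) (by omega),
      hgp, hgr, hga]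
    rw [generate_reads.eq_def]
    split
    · rename_i p' ra' aa' hp' hra' haa'
      rw [hp'] at hp; rw [hra'] at hra; rw [haa'] at haa
      cases hp; cases hra; cases haa
      rw [if_pos (by omega : i = (pos.length : Int) - 1)]
      rfl
    · rename_i hbad
      exact (hbad p ra aa hp hra haa).elim
  | succ d ih =>
    intro i s hd hlo hhi
    obtain ⟨p, hp⟩ : ∃ p, PySem.List.pyGet? pos i = some p := by
      cases h : PySem.List.pyGet? pos i with
      | none => exact absurd ⟨hlo, hhi⟩ ((PySem.List.pyGet?_eq_none_iff pos i).mp h)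
      | some p => exact ⟨p, rfl⟩
    obtain ⟨ra, hra⟩ : ∃ ra, PySem.List.pyGet? ref i = some ra := by
      cases h : PySem.List.pyGet? ref i with
      | none => exact absurd ⟨by omega, by omega⟩ ((PySem.List.pyGet?_eq_none_iff ref i).mp h)
      | some ra => exact ⟨ra, rfl⟩
    obtain ⟨aa, haa⟩ : ∃ aa, PySem.List.pyGet? alt i = some aa := by
      cases h : PySem.List.pyGet? alt i with
      | none => exact absurd ⟨by omega, by omega⟩ ((PySem.List.pyGet?_eq_none_iff alt i).mp h)
      | some aa => exact ⟨aa, rfl⟩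
    have hgp : PySem.List.pyGetD pos i 0 = p := by simp [PySem.List.pyGetD, hp]
    have hgr : PySem.List.pyGetD ref i "" = ra := by simp [PySem.List.pyGetD, hra]
    have hga : PySem.List.pyGetD alt i "" = aa := by simp [PySem.List.pyGetD, haa]
    rw [pvAlt_rec s ref alt pos i hhi, hgp, hgr, hga,
      ← ih (i + 1) _ (by omega) (by omega) (by omega),
      ← ih (i + 1) _ (by omega) (by omega) (by omega)]
    rw [generate_reads.eq_def]
    split
    · rename_i p' ra' aa' hp' hra' haa'
      rw [hp'] at hp; rw [hra'] at hra; rw [haa'] at haa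
      cases hp; cases hra; cases haa
      rw [if_neg (by omega : ¬ i = (pos.length : Int) - 1)]
    · rename_i hbad
      exact (hbad p ra aa hp hra haa).elim

-- ===== VERDICT (by name: the statement is the Claim_ definition above) =====
theorem generate_reads_spec : Claim_equal_generate_reads := by
  intro s ref alt pos i _ hpre
  unfold Spec_generate_reads
  exact pvMain ref alt pos hpre.2.2.1 hpre.2.2.2 _ i s rfl hpre.1 hpre.2.1
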